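-- pv_equiv track=rewrite | github.com/crakkerjak/practice | google_dirs.py | solution
-- ===== SOURCE A (Python) =====
-- def solution(s):
--     file_structure = s.split('\n')
--     wd = []
--     current_depth = 0
--     dirs = set()
--     for entry in file_structure:
--         fn = entry.strip()
--         current_depth = len(entry) - len(fn)
--         wd = wd[:current_depth]
--         if '.' in fn:
--             if fn.split('.')[1] in ['jpeg','png','gif']:
--                 dirs.add(''.join(s for s in wd))
--         else:
--             wd.append('/' + fn)
--     return sum(len(s) for s in dirs)
-- ===== SOURCE B (Python) =====
-- def solution(s):
--     # Recursive-descent parse of the indentation structure: no directory stack,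
--     # no truncation; each call owns one directory's subtree and carries its path.
--     lines = s.split('\n')
--     dirs = set()
--
--     def walk(i, level, prefix):
--         # consume the lines belonging to `prefix`; return first unconsumed index
--         while i < len(lines):
--             entry = lines[i]
--             fn = entry.strip()
--             if len(entry) - len(fn) < level:
--                 break
--             i += 1
--             if '.' in fn:
--                 if fn.split('.')[1] in ('jpeg', 'png', 'gif'):
--                     dirs.add(prefix)
--             else:
--                 i = walk(i, level + 1, prefix + '/' + fn)
--         return i
--
--     walk(0, 0, '')
--     return sum(len(p) for p in dirs)
-- ===== Notes on version B (the rewrite author's own statement) =====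
-- stated objective: alternative
-- what changed: B replaces A's single pass over a truncated directory-name stack (wd sliced to each line's depth, joined on every image hit) with a recursive-descent parse of the indentation structure: each recursive call owns one directory's subtree, consumes its lines while they are at least as deep as the call's level, carries the directory's path string down the recursion, and returns the unconsumed tail; there is no stack, no truncation and no join.
import Mathlib
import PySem

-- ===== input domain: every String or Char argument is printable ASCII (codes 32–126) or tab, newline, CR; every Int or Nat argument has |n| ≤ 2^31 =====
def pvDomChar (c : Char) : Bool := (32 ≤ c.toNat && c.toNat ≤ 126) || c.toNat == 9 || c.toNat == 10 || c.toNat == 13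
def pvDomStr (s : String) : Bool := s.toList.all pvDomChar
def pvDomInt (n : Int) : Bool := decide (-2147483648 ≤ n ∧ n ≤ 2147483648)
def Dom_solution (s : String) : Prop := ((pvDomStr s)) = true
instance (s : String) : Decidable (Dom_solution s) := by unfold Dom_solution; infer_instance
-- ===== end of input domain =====

-- B replaces A's truncated directory stack with a recursive-descent parse of the
-- indentation structure, carrying each directory's path down the recursion
-- (objective: alternative).

-- ===== PORT A =====
-- the image-extension test `fn.split('.')[1] in ['jpeg','png','gif']`,
-- shared verbatim by both Pythons (the `.getD`s are unreachable: '.' ∈ fn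
-- guarantees split('.') has ≥ 2 pieces, so no IndexError can occur)
def pvImgTest (fn : List Char) : Bool :=
  decide ((PySem.List.pyGet? ((PySem.Chars.split? fn ['.']).getD []) 1).getD [] ∈
    [['j','p','e','g'], ['p','n','g'], ['g','i','f']])

-- loop body of A: state = (wd component stack, dirs set)
def pvStepA (st : List (List Char) × PySem.Set (List Char)) (entry : List Char) :
    List (List Char) × PySem.Set (List Char) :=
  let fn := PySem.Chars.strip entry
  let depth : Int := PySem.List.len entry - PySem.List.len fn
  let wd := PySem.List.slice st.1 none (some depth)
  if PySem.Chars.isIn ['.'] fn then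
    if pvImgTest fn then (wd, PySem.Set.add st.2 (PySem.Chars.join [] wd))
    else (wd, st.2)
  else (wd ++ ['/' :: fn], st.2)

def solution (s : String) : Int :=
  let file_structure := (PySem.Chars.split? s.toList ['\n']).getD []
  let fin := file_structure.foldl pvStepA ([], PySem.Set.empty)
  (fin.2.map (fun t => PySem.List.len t)).sum

-- ===== PORT B =====
-- `len(entry) - len(entry.strip())`, the indentation depth of a line
def pvDepth (e : List Char) : Int :=
  PySem.List.len e - PySem.List.len (PySem.Chars.strip e)

-- Source B's `walk`: consume the lines belonging to directory `prefx` (recursing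
-- into subdirectories), return (unconsumed tail, dirs).  The fuel argument is
-- the index-bounded `while i < len(lines)` loop made structural; Source B starts
-- it at len(lines), which never runs out.
def pvWalk : Nat → List (List Char) → Int → List Char → PySem.Set (List Char) →
    List (List Char) × PySem.Set (List Char)
  | 0, lines, _, _, dirs => (lines, dirs)
  | _ + 1, [], _, _, dirs => ([], dirs)
  | f + 1, e :: rest, level, prefx, dirs =>
    let fn := PySem.Chars.strip e
    if pvDepth e < level then (e :: rest, dirs)
    else if PySem.Chars.isIn ['.'] fn then
      if pvImgTest fn then pvWalk f rest level prefx (PySem.Set.add dirs prefx)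
      else pvWalk f rest level prefx dirs
    else
      let r := pvWalk f rest (level + 1) (prefx ++ '/' :: fn) dirs
      pvWalk f r.1 level prefx r.2

def solution_alt (s : String) : Int :=
  let lines := (PySem.Chars.split? s.toList ['\n']).getD []
  let fin := pvWalk lines.length lines 0 [] PySem.Set.empty
  (fin.2.map (fun t => PySem.List.len t)).sum

-- ===== PRECONDITION & SPEC =====
def Spec_solution (s : String) (out : Int) : Prop := out = solution_alt s
instance (s : String) (out : Int) : Decidable (Spec_solution s out) := by unfold Spec_solution; infer_instance

-- ===== CLAIM (what is proved, stated in full; the proofs are below) =====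
def Claim_equal_solution : Prop := ∀ (s : String), Dom_solution s → Spec_solution s (solution s)

-- ===== LEMMAS AND PROOFS =====

theorem pv_strip_le (e : List Char) : (PySem.Chars.strip e).length ≤ e.length := by
  simp only [PySem.Chars.strip, PySem.Chars.rstrip, PySem.Chars.lstrip, List.length_reverse]
  calc (List.dropWhile PySem.Chars.isspace (List.dropWhile PySem.Chars.isspace e).reverse).length
      ≤ (List.dropWhile PySem.Chars.isspace e).reverse.length := List.length_dropWhile_le _ _
    _ ≤ e.length := by simpa using List.length_dropWhile_le _ e

theorem pv_depth_nonneg (e : List Char) : 0 ≤ pvDepth e := by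
  have := pv_strip_le e
  simp only [pvDepth, PySem.List.len]
  omega

theorem pv_join_flatten (l : List (List Char)) : PySem.Chars.join [] l = l.flatten := by
  induction l with
  | nil => simp [PySem.Chars.join, List.intercalate]
  | cons x xs ih =>
    cases xs with
    | nil => simp [PySem.Chars.join, List.intercalate]
    | cons y ys =>
      have h : PySem.Chars.join [] (x :: y :: ys) = x ++ [] ++ PySem.Chars.join [] (y :: ys) := by
        simp [PySem.Chars.join, List.intercalate, List.intersperse]
      rw [h, ih]
      simp

-- slicing past the end keeps the whole list
theorem pv_slice_full (wd : List (List Char)) (d : Int) (h0 : 0 ≤ d)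
    (h : (wd.length : Int) ≤ d) : PySem.List.slice wd none (some d) = wd := by
  rw [PySem.List.slice_to _ h0]
  exact List.take_of_length_le (by omega)

-- slicing to d ≤ |wd| ignores anything appended after wd
theorem pv_slice_append (wd ext : List (List Char)) (d : Int) (h0 : 0 ≤ d)
    (h : d ≤ (wd.length : Int)) :
    PySem.List.slice (wd ++ ext) none (some d) = PySem.List.slice wd none (some d) := by
  rw [PySem.List.slice_to _ h0, PySem.List.slice_to _ h0]
  exact List.take_append_of_le_length (by omega)

-- A's step only looks at the first `depth` stack entries
theorem pv_stepA_ext (wd ext : List (List Char)) (c : PySem.Set (List Char)) (e : List Char)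
    (h : pvDepth e ≤ (wd.length : Int)) :
    pvStepA (wd ++ ext, c) e = pvStepA (wd, c) e := by
  simp only [pvStepA]
  rw [show PySem.List.slice (wd ++ ext) none
      (some (PySem.List.len e - PySem.List.len (PySem.Chars.strip e)))
      = PySem.List.slice wd none (some (PySem.List.len e - PySem.List.len (PySem.Chars.strip e)))
    from pv_slice_append wd ext _ (pv_depth_nonneg e) h]

-- A's step on a line at least as deep as the whole stack
theorem pv_stepA_deep (wd : List (List Char)) (c : PySem.Set (List Char)) (e : List Char)
    (h : (wd.length : Int) ≤ pvDepth e) :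
    pvStepA (wd, c) e =
      (let fn := PySem.Chars.strip e
       if PySem.Chars.isIn ['.'] fn then
         if pvImgTest fn then (wd, PySem.Set.add c wd.flatten) else (wd, c)
       else (wd ++ ['/' :: fn], c)) := by
  simp only [pvStepA]
  rw [show PySem.List.slice wd none
      (some (PySem.List.len e - PySem.List.len (PySem.Chars.strip e))) = wd
    from pv_slice_full wd _ (pv_depth_nonneg e) h, pv_join_flatten]

-- the correspondence: running `walk` at level |wd| with prefix = ''.join(wd)
-- consumes a prefix of the lines, computing exactly A's dirs set over that
-- prefix (A's stack meanwhile is wd with some leftovers appended), and stops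
-- at the first line shallower than |wd|
theorem pvW (fuel : Nat) : ∀ (lines : List (List Char)), lines.length ≤ fuel →
    ∀ (wd : List (List Char)) (dirs : PySem.Set (List Char)),
    ∃ pre ext,
      lines = pre ++ (pvWalk fuel lines (wd.length : Int) wd.flatten dirs).1 ∧
      pre.foldl pvStepA (wd, dirs) = (wd ++ ext, (pvWalk fuel lines (wd.length : Int) wd.flatten dirs).2) ∧
      ∀ e, (pvWalk fuel lines (wd.length : Int) wd.flatten dirs).1.head? = some e →
        pvDepth e < (wd.length : Int) := by
  induction fuel with
  | zero =>
    intro lines h wd dirs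
    have : lines = [] := List.eq_nil_of_length_eq_zero (by omega)
    subst this
    exact ⟨[], [], by simp [pvWalk], by simp [pvWalk], by simp [pvWalk]⟩
  | succ f ih =>
    intro lines h wd dirs
    cases lines with
    | nil => exact ⟨[], [], by simp [pvWalk], by simp [pvWalk], by simp [pvWalk]⟩
    | cons e rest =>
      have hrest : rest.length ≤ f := by simpa using h
      by_cases h1 : pvDepth e < (wd.length : Int)
      · refine ⟨[], [], ?_, ?_, ?_⟩ <;> simp [pvWalk, h1]
      · by_cases h2 : PySem.Chars.isIn ['.'] (PySem.Chars.strip e)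
        · by_cases h3 : pvImgTest (PySem.Chars.strip e)
          · -- image line: A adds join(wd), B adds the prefix
            have hw : pvWalk (f + 1) (e :: rest) (wd.length : Int) wd.flatten dirs
                = pvWalk f rest (wd.length : Int) wd.flatten (PySem.Set.add dirs wd.flatten) := by
              simp [pvWalk, h1, h2, h3]
            obtain ⟨pre', ext', hs, hf, hh⟩ := ih rest hrest wd (PySem.Set.add dirs wd.flatten)
            rw [hw]
            refine ⟨e :: pre', ext', by simpa using hs, ?_, hh⟩
            rw [List.foldl_cons, pv_stepA_deep wd dirs e (by omega)]
            simpa [h2, h3] using hf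
          · -- non-image file line: both sides skip it
            have hw : pvWalk (f + 1) (e :: rest) (wd.length : Int) wd.flatten dirs
                = pvWalk f rest (wd.length : Int) wd.flatten dirs := by
              simp [pvWalk, h1, h2, h3]
            obtain ⟨pre', ext', hs, hf, hh⟩ := ih rest hrest wd dirs
            rw [hw]
            refine ⟨e :: pre', ext', by simpa using hs, ?_, hh⟩
            rw [List.foldl_cons, pv_stepA_deep wd dirs e (by omega)]
            simpa [h2, h3] using hf
        · -- directory line: descend, then resume at this level
          set wd1 : List (List Char) := wd ++ ['/' :: PySem.Chars.strip e] with hwd1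
          have hl1 : ((wd.length : Int) + 1) = (wd1.length : Int) := by simp [hwd1]
          have hp1 : wd.flatten ++ '/' :: PySem.Chars.strip e = wd1.flatten := by simp [hwd1]
          have hw : pvWalk (f + 1) (e :: rest) (wd.length : Int) wd.flatten dirs
              = pvWalk f (pvWalk f rest (wd1.length : Int) wd1.flatten dirs).1
                  (wd.length : Int) wd.flatten
                  (pvWalk f rest (wd1.length : Int) wd1.flatten dirs).2 := by
            simp only [pvWalk]
            rw [hl1, hp1]
            simp [h1, h2]
          set R1 := pvWalk f rest (wd1.length : Int) wd1.flatten dirs with hR1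
          set R2 := pvWalk f R1.1 (wd.length : Int) wd.flatten R1.2 with hR2
          obtain ⟨pre1, ext1, hs1, hf1, hh1⟩ := ih rest hrest wd1 dirs
          rw [← hR1] at hs1 hf1 hh1
          have hr1 : R1.1.length ≤ f := by
            have := congrArg List.length hs1
            simp at this
            omega
          obtain ⟨pre2, ext2, hs2, hf2, hh2⟩ := ih R1.1 hr1 wd R1.2
          rw [← hR2] at hs2 hf2 hh2
          have hstep : pvStepA (wd, dirs) e = (wd1, dirs) := by
            rw [pv_stepA_deep wd dirs e (by omega)]
            simp [h2, hwd1]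
          rw [hw]
          cases pre2 with
          | nil =>
            have hW2 : R2.2 = R1.2 := by
              have := congrArg Prod.snd hf2
              simpa using this.symm
            refine ⟨e :: (pre1 ++ []), ['/' :: PySem.Chars.strip e] ++ ext1, ?_, ?_, hh2⟩
            · simp only [List.nil_append] at hs2
              rw [hs1, hs2]
              simp
            · rw [List.foldl_cons, hstep]
              simp only [List.append_nil]
              rw [hf1, hW2, hwd1, List.append_assoc]
          | cons e2 t2 =>
            have hd2 : pvDepth e2 ≤ (wd.length : Int) := by
              have := hh1 e2 (by rw [hs2]; rfl)
              rw [← hl1] at this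
              omega
            refine ⟨e :: (pre1 ++ e2 :: t2), ext2, ?_, ?_, hh2⟩
            · rw [hs1, hs2]
              simp
            · rw [List.foldl_cons, hstep, List.foldl_append, hf1, List.foldl_cons]
              have hx : pvStepA (wd1 ++ ext1, R1.2) e2 = pvStepA (wd, R1.2) e2 := by
                rw [hwd1, List.append_assoc]
                exact pv_stepA_ext _ _ _ _ hd2
              rw [hx, ← List.foldl_cons]
              exact hf2

-- ===== VERDICT (by name: the statement is the Claim_ definition above) =====
theorem solution_spec : Claim_equal_solution := by
  intro s _
  unfold Spec_solution solution solution_alt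
  obtain ⟨pre, ext, h1, h2, h3⟩ :=
    pvW ((PySem.Chars.split? s.toList ['\n']).getD []).length
      ((PySem.Chars.split? s.toList ['\n']).getD []) le_rfl [] PySem.Set.empty
  simp only [List.flatten_nil, List.length_nil, Nat.cast_zero, List.nil_append] at h1 h2 h3
  have hnil : (pvWalk ((PySem.Chars.split? s.toList ['\n']).getD []).length
      ((PySem.Chars.split? s.toList ['\n']).getD []) 0 [] PySem.Set.empty).1 = [] := by
    cases hc : (pvWalk ((PySem.Chars.split? s.toList ['\n']).getD []).length
        ((PySem.Chars.split? s.toList ['\n']).getD []) 0 [] PySem.Set.empty).1 with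
    | nil => rfl
    | cons a t =>
      have hlt := h3 a (by rw [hc]; rfl)
      have := pv_depth_nonneg a
      omega
  rw [hnil, List.append_nil] at h1
  show (List.map (fun t => PySem.List.len t)
      (List.foldl pvStepA ([], PySem.Set.empty) ((PySem.Chars.split? s.toList ['\n']).getD [])).2).sum
    = (List.map (fun t => PySem.List.len t)
      (pvWalk ((PySem.Chars.split? s.toList ['\n']).getD []).length
        ((PySem.Chars.split? s.toList ['\n']).getD []) 0 [] PySem.Set.empty).2).sum
  conv_lhs => rw [h1]
  rw [h2]
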